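-- pv_equiv track=rewrite | github.com/nitika-garg/K-Means | KMeans.py | SplitCluster
-- ===== SOURCE A (Python) =====
-- def SplitCluster(k, maxCluster, size,clusterToReplace,clusters):
--     half=int(size/2)
--     for i in range(len(clusters)):
--         if half>0:
--             if clusters[i]==maxCluster:
--                 clusters[i]=clusterToReplace
--                 half=half-1
--     return clusters
-- ===== SOURCE B (Python) =====
-- def SplitCluster(k, maxCluster, size, clusterToReplace, clusters):
--     half = int(size / 2)
--     idxs = [i for i, c in enumerate(clusters) if c == maxCluster]
--     for i in idxs[:max(half, 0)]:
--         clusters[i] = clusterToReplace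
--     return clusters
-- ===== Notes on version B (the rewrite author's own statement) =====
-- stated objective: alternative
-- what changed: B is a two-phase find-then-patch: it first collects all indices whose label equals maxCluster, then assigns clusterToReplace to the first max(half,0) of them, instead of A's single counter-driven pass that decrements a budget while scanning.
import Mathlib
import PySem

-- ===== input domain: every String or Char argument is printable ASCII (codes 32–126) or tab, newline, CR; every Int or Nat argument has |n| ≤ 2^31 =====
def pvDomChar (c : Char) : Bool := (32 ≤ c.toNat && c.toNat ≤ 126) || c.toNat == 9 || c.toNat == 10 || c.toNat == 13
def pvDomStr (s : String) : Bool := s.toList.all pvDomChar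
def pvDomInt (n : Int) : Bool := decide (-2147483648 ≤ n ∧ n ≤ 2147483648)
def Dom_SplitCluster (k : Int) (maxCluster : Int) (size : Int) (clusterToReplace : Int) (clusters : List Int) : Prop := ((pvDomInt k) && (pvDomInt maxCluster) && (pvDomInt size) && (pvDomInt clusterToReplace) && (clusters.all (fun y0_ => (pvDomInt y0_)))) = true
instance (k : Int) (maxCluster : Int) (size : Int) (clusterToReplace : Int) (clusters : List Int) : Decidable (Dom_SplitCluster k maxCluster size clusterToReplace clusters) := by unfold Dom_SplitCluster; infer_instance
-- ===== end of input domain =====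

-- B replaces A's counter-driven in-place scan by a two-phase find-then-patch
-- (collect matching indices, then overwrite the first max(half,0) of them);
-- alternative decomposition, same cost. Python A and B mutate `clusters` in
-- place; the equivalence proved here is about the returned list value.

-- ===== PORT A =====
-- loop body of A: `if half>0: if clusters[i]==maxCluster: clusters[i]=clusterToReplace; half=half-1`
def stepA (maxCluster clusterToReplace : Int) (st : List Int × Int) (i : Nat) : List Int × Int :=
  if st.2 > 0 then
    if st.1.getD i 0 = maxCluster then (st.1.set i clusterToReplace, st.2 - 1) else st
  else st

-- int(size/2): for |size| ≤ 2^31 the float division size/2 is exact and int()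
-- truncates toward zero, which is Int.tdiv size 2 (exact on the stated domain).
def SplitCluster (k : Int) (maxCluster : Int) (size : Int) (clusterToReplace : Int) (clusters : List Int) : List Int :=
  let half := Int.tdiv size 2
  ((List.range clusters.length).foldl (stepA maxCluster clusterToReplace) (clusters, half)).1

-- ===== PORT B =====
def SplitCluster_alt (k : Int) (maxCluster : Int) (size : Int) (clusterToReplace : Int) (clusters : List Int) : List Int :=
  let half := Int.tdiv size 2
  let idxs := (List.range clusters.length).filter (fun i => clusters.getD i 0 = maxCluster)
  (idxs.take (max half 0).toNat).foldl (fun cs i => cs.set i clusterToReplace) clusters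

-- ===== PRECONDITION & SPEC =====
def Spec_SplitCluster (k : Int) (maxCluster : Int) (size : Int) (clusterToReplace : Int) (clusters : List Int) (out : List Int) : Prop := out = SplitCluster_alt k maxCluster size clusterToReplace clusters
instance (k : Int) (maxCluster : Int) (size : Int) (clusterToReplace : Int) (clusters : List Int) (out : List Int) : Decidable (Spec_SplitCluster k maxCluster size clusterToReplace clusters out) := by unfold Spec_SplitCluster; infer_instance

-- ===== CLAIM (what is proved, stated in full; the proofs are below) =====
def Claim_equal_SplitCluster : Prop := ∀ (k : Int) (maxCluster : Int) (size : Int) (clusterToReplace : Int) (clusters : List Int), Dom_SplitCluster k maxCluster size clusterToReplace clusters → Spec_SplitCluster k maxCluster size clusterToReplace clusters (SplitCluster k maxCluster size clusterToReplace clusters)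

-- ===== LEMMAS AND PROOFS =====

-- common characterization: patch the list from the left while the budget lasts,
-- returning the patched list together with the remaining budget
def pairPatch (M R : Int) : List Int → Int → List Int × Int
  | [], h => ([], h)
  | c :: t, h =>
    if h > 0 ∧ c = M then
      let p := pairPatch M R t (h - 1); (R :: p.1, p.2)
    else
      let p := pairPatch M R t h; (c :: p.1, p.2)

theorem pairPatch_length (M R : Int) : ∀ (cs : List Int) (h : Int),
    (pairPatch M R cs h).1.length = cs.length := by
  intro cs
  induction cs with
  | nil => intro h; simp [pairPatch]
  | cons c t ih =>
    intro h
    by_cases hc : h > 0 ∧ c = M <;> simp [pairPatch, hc, ih]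

theorem pairPatch_concat (M R a : Int) : ∀ (cs : List Int) (h : Int),
    pairPatch M R (cs ++ [a]) h =
      (if (pairPatch M R cs h).2 > 0 ∧ a = M
        then ((pairPatch M R cs h).1 ++ [R], (pairPatch M R cs h).2 - 1)
        else ((pairPatch M R cs h).1 ++ [a], (pairPatch M R cs h).2)) := by
  intro cs
  induction cs with
  | nil =>
    intro h
    by_cases hc : h > 0 ∧ a = M <;> simp [pairPatch, hc]
  | cons c t ih =>
    intro h
    by_cases hc : h > 0 ∧ c = M <;>
      simp only [List.cons_append, pairPatch, hc, if_neg, not_false_iff, ih] <;>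
      split_ifs <;> simp_all

theorem foldA_append (M R a : Int) : ∀ (L : List Nat) (cs : List Int) (h : Int),
    (∀ i ∈ L, i < cs.length) →
    L.foldl (stepA M R) (cs ++ [a], h) =
      ((L.foldl (stepA M R) (cs, h)).1 ++ [a], (L.foldl (stepA M R) (cs, h)).2) := by
  intro L
  induction L with
  | nil => intro cs h _; simp
  | cons i L ih =>
    intro cs h hb
    have hi : i < cs.length := hb i (by simp)
    have hget : (cs ++ [a]).getD i 0 = cs.getD i 0 := by
      simp [List.getD, List.getElem?_append_left hi]
    have hstep : stepA M R (cs ++ [a], h) i =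
        ((stepA M R (cs, h) i).1 ++ [a], (stepA M R (cs, h) i).2) := by
      simp only [stepA, hget]
      split_ifs <;> simp [List.set_append_left _ _ hi]
    have hlen : (stepA M R (cs, h) i).1.length = cs.length := by
      simp only [stepA]; split_ifs <;> simp
    simp only [List.foldl_cons, hstep]
    rw [ih (stepA M R (cs, h) i).1 (stepA M R (cs, h) i).2
      (by intro j hj; rw [hlen]; exact hb j (List.mem_cons_of_mem _ hj))]

theorem foldA_eq_pairPatch (M R : Int) : ∀ (cs : List Int) (h : Int),
    (List.range cs.length).foldl (stepA M R) (cs, h) = pairPatch M R cs h := by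
  intro cs
  induction cs using List.reverseRecOn with
  | nil => intro h; simp [pairPatch]
  | append_singleton cs a ih =>
    intro h
    have hlen : (cs ++ [a]).length = cs.length + 1 := by simp
    rw [hlen, List.range_succ, List.foldl_append]
    rw [foldA_append M R a _ cs h (by intro i hi; simpa using List.mem_range.mp hi)]
    rw [ih h, pairPatch_concat]
    have hplen : (pairPatch M R cs h).1.length = cs.length := pairPatch_length M R cs h
    simp only [List.foldl_cons, List.foldl_nil, stepA]
    have hget : ((pairPatch M R cs h).1 ++ [a]).getD cs.length 0 = a := by
      rw [← hplen]
      simp [List.getD]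
    have hset : ((pairPatch M R cs h).1 ++ [a]).set cs.length R = (pairPatch M R cs h).1 ++ [R] := by
      rw [← hplen, List.set_append_right _ _ (le_refl _)]
      simp
    split_ifs with h1 h2 h3 <;> simp_all

theorem foldB_shift (R : Int) : ∀ (L : List Nat) (x : Int) (cs : List Int),
    (L.map (·+1)).foldl (fun l i => l.set i R) (x :: cs) =
      x :: L.foldl (fun l i => l.set i R) cs := by
  intro L
  induction L with
  | nil => intro x cs; simp
  | cons i L ih => intro x cs; simp [List.set, ih]

theorem foldB_eq_pairPatch (M R : Int) : ∀ (cs : List Int) (h : Int),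
    (((List.range cs.length).filter (fun i => cs.getD i 0 = M)).take (max h 0).toNat).foldl
        (fun l i => l.set i R) cs = (pairPatch M R cs h).1 := by
  intro cs
  induction cs with
  | nil => intro h; simp [pairPatch]
  | cons c t ih =>
    intro h
    have hrange : List.range (c :: t).length = 0 :: (List.range t.length).map (·+1) := by
      simpa [Nat.succ_eq_add_one] using (List.range_succ_eq_map (n := t.length))
    have hfilt : ((List.range t.length).map (·+1)).filter
        (fun i => decide ((c :: t).getD i 0 = M)) =
        ((List.range t.length).filter (fun i => t.getD i 0 = M)).map (·+1) := by
      rw [List.filter_map]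
      refine congrArg _ (List.filter_congr ?_)
      intro i _
      simp [Function.comp, List.getD]
    by_cases hc : c = M
    · by_cases hh : h > 0
      · -- head matches and budget available: set index 0, recurse with h-1
        have hn : (max h 0).toNat = ((max (h-1) 0).toNat) + 1 := by omega
        rw [hrange]
        simp only [List.filter_cons]
        rw [hfilt]
        have : (decide ((c :: t).getD 0 0 = M)) = true := by simp [List.getD, hc]
        rw [this]
        simp only [if_pos trivial, hn, List.take_succ_cons]
        rw [← List.map_take]
        simp only [List.foldl_cons, List.set]
        rw [foldB_shift]
        rw [ih (h-1)]
        simp [pairPatch, hh, hc]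
      · -- budget exhausted: nothing is set
        have hn : (max h 0).toNat = 0 := by omega
        rw [hn]
        simp only [List.take_zero, List.foldl_nil]
        have ht : (pairPatch M R t h).1 = t := by
          have := ih h
          rw [hn] at this
          simpa using this.symm
        have hpp : pairPatch M R (c :: t) h = (c :: (pairPatch M R t h).1, (pairPatch M R t h).2) := by
          simp [pairPatch, hh]
        rw [hpp]
        simp [ht]
    · -- head does not match: index 0 filtered out
      rw [hrange]
      simp only [List.filter_cons]
      have : (decide ((c :: t).getD 0 0 = M)) = false := by simp [List.getD, hc]
      rw [this]
      simp only [Bool.false_eq_true, if_false]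
      rw [hfilt, ← List.map_take, foldB_shift, ih h]
      simp [pairPatch, hc]

-- ===== VERDICT (by name: the statement is the Claim_ definition above) =====
theorem SplitCluster_spec : Claim_equal_SplitCluster := by
  intro k M size R cs _
  simp only [Spec_SplitCluster, SplitCluster, SplitCluster_alt,
    foldA_eq_pairPatch, foldB_eq_pairPatch]
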